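-- pv_equiv track=rewrite | github.com/ICS2985/Investigacion-de-pregrado | estimacion_stockout.py | stockout_by_period
-- ===== SOURCE A (Python) =====
-- def stockout_by_period(Estimacion):
--     stockout = dict()
--     max_period = max(Estimacion)
--     for i in range(0, max_period + 1):
--         count = Estimacion.count(i)
--         if count > 0:
--             stockout[i] = count
--     return stockout
-- ===== SOURCE B (Python) =====
-- def stockout_by_period(Estimacion):
--     counts = {}
--     for x in Estimacion:
--         if x >= 0:
--             counts[x] = counts.get(x, 0) + 1
--     return {p: counts[p] for p in sorted(counts)}
-- ===== Notes on version B (the rewrite author's own statement) =====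
-- stated objective: faster
-- what changed: Replaces the range(0, max+1) outer loop with a per-value .count rescan by a single one-pass counting into a dict of the non-negative values followed by a sort of its keys.
-- crash fix: On the empty list A raises ValueError (max() of empty sequence) while B returns {}. — e.g. on stockout_by_period([]): A raises ValueError, B returns []
import Mathlib
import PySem

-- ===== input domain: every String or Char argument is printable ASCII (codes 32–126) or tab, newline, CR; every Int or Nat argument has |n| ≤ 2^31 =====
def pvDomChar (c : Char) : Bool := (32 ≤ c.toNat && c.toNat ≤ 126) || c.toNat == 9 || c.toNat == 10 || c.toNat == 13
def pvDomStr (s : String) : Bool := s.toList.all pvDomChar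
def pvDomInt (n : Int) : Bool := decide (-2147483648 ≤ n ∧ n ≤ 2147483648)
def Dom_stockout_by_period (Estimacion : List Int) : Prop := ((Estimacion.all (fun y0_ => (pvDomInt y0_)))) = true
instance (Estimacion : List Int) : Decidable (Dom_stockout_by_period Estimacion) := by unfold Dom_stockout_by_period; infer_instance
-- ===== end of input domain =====

-- B replaces A's range(0,max+1) loop with per-value .count rescans by one counting pass over the
-- non-negative values plus a sort of the keys (measurably faster on large inputs).


-- ===== PORT A =====
-- max(Estimacion) raises ValueError on []; the none branch is excluded by Pre_.
def stockout_by_period (Estimacion : List Int) : List (Int × Int) :=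
  match PySem.List.max? Estimacion (fun x => x) with
  | none => []
  | some max_period =>
    ((PySem.List.pyRange 0 (max_period + 1) 1).foldl
      (fun stockout i =>
        let count : Int := (Estimacion.count i : Int)
        if count > 0 then PySem.Dict.insert stockout i count else stockout)
      PySem.Dict.empty).items

-- ===== PORT B =====
def stockout_by_period_alt (Estimacion : List Int) : List (Int × Int) :=
  let counts : PySem.Dict Int Int :=
    Estimacion.foldl
      (fun d x => if x ≥ 0 then PySem.Dict.insert d x (PySem.Dict.getD d x 0 + 1) else d)
      PySem.Dict.empty
  ((PySem.List.sorted (PySem.Dict.keys counts) (fun p => p) false).foldl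
      (fun d p => PySem.Dict.insert d p (PySem.Dict.getD counts p 0))
      PySem.Dict.empty).items

-- ===== PRECONDITION & SPEC =====
-- Pre_ excludes only the empty list, on which A's max() raises ValueError.
def Pre_stockout_by_period (Estimacion : List Int) : Prop := Estimacion ≠ []
instance (Estimacion : List Int) : Decidable (Pre_stockout_by_period Estimacion) := by unfold Pre_stockout_by_period; infer_instance
def pvWitness_stockout_by_period : List Int := [2, 0, 2, 5]

-- On the empty list A raises ValueError (max() of empty sequence) while B returns {}.
def Raises_stockout_by_period (Estimacion : List Int) : Prop := Estimacion = []
instance (Estimacion : List Int) : Decidable (Raises_stockout_by_period Estimacion) := by unfold Raises_stockout_by_period; infer_instance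
def pvRaiseWitness_stockout_by_period : List Int := []
def pvRaiseWitnessOut_stockout_by_period : List (Int × Int) := []

def Spec_stockout_by_period (Estimacion : List Int) (out : List (Int × Int)) : Prop := out = stockout_by_period_alt Estimacion
instance (Estimacion : List Int) (out : List (Int × Int)) : Decidable (Spec_stockout_by_period Estimacion out) := by unfold Spec_stockout_by_period; infer_instance

-- ===== CLAIM (what is proved, stated in full; the proofs are below) =====
def Claim_equal_stockout_by_period : Prop := ∀ (Estimacion : List Int), Dom_stockout_by_period Estimacion → Pre_stockout_by_period Estimacion → Spec_stockout_by_period Estimacion (stockout_by_period Estimacion)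
def Claim_raises_stockout_by_period : Prop := (∀ (Estimacion : List Int), Dom_stockout_by_period Estimacion → Raises_stockout_by_period Estimacion → ¬ Pre_stockout_by_period Estimacion) ∧ (Dom_stockout_by_period (pvRaiseWitness_stockout_by_period) ∧ Raises_stockout_by_period (pvRaiseWitness_stockout_by_period) ∧ stockout_by_period_alt (pvRaiseWitness_stockout_by_period) = pvRaiseWitnessOut_stockout_by_period)

-- ===== LEMMAS AND PROOFS =====

theorem stockout_main (E : List Int) (hne : E ≠ []) :
    stockout_by_period E = stockout_by_period_alt E := by
  obtain ⟨m, hm⟩ : ∃ m, PySem.List.max? E (fun x => x) = some m := by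
    cases h : PySem.List.max? E (fun x => x) with
    | none => exact absurd ((PySem.List.max?_eq_none_iff E _).mp h) hne
    | some m => exact ⟨m, rfl⟩
  have hmax : ∀ y ∈ E, y ≤ m := fun y hy => PySem.List.max?_isMax hm y hy
  set F : List Int := E.filter (fun x => decide (x ≥ 0)) with hF
  set R : List Int :=
    (PySem.List.pyRange 0 (m + 1) 1).filter (fun i => decide ((E.count i : Int) > 0)) with hR
  -- B's counter
  have hcounts : E.foldl
      (fun d x => if x ≥ 0 then PySem.Dict.insert d x (PySem.Dict.getD d x 0 + 1) else d)
      PySem.Dict.empty = PySem.Dict.counter F := by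
    rw [PySem.List.foldl_ite_eq_foldl_filter]
    exact PySem.Dict.foldl_insert_getD_add_one_eq_counter F
  -- R facts
  have hRnd : R.Nodup := (PySem.List.nodup_pyRange_one 0 (m+1)).filter _
  have hRpw : R.Pairwise (· < ·) := (PySem.List.pairwise_lt_pyRange_one 0 (m+1)).filter _
  have hmemR : ∀ a : Int, a ∈ R ↔ (a ∈ E ∧ 0 ≤ a) := by
    intro a
    simp only [hR, List.mem_filter, PySem.List.mem_pyRange_one, decide_eq_true_eq,
      Int.lt_iff_add_one_le]
    constructor
    · rintro ⟨⟨h0, _⟩, hc⟩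
      refine ⟨List.count_pos_iff.mp ?_, h0⟩
      exact_mod_cast hc
    · rintro ⟨hmem, h0⟩
      refine ⟨⟨h0, by have := hmax a hmem; omega⟩, ?_⟩
      exact_mod_cast List.count_pos_iff.mpr hmem
  have hperm : R.Perm (PySem.Set.ofList F) := by
    rw [List.perm_ext_iff_of_nodup hRnd (PySem.Set.nodup_ofList F)]
    intro a
    rw [hmemR, PySem.Set.mem_ofList, hF, List.mem_filter]
    simp
  have hsorted : PySem.List.sorted (PySem.Set.ofList F) (fun p => p) false = R :=
    PySem.List.sorted_eq_of_perm_of_pairwise_lt _ _ _ hperm hRpw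
  -- A side
  have hA : stockout_by_period E =
      R.map (fun i => (i, (E.count i : Int))) := by
    unfold stockout_by_period
    rw [hm]
    show ((PySem.List.pyRange 0 (m + 1) 1).foldl
      (fun stockout i => if (E.count i : Int) > 0
        then PySem.Dict.insert stockout i (E.count i : Int) else stockout)
      PySem.Dict.empty).items = _
    rw [PySem.List.foldl_ite_eq_foldl_filter
      (p := fun i => (E.count i : Int) > 0)
      (f := fun stockout i => PySem.Dict.insert stockout i (E.count i : Int))]
    rw [PySem.Dict.items_foldl_insert_fresh R (fun i => i)
      (fun i => (E.count i : Int)) PySem.Dict.empty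
      (fun a _ => PySem.Dict.contains_empty a) (by simpa using hRnd)]
    simp [PySem.Dict.empty]
  -- B side
  have hB : stockout_by_period_alt E =
      R.map (fun i => (i, (E.count i : Int))) := by
    unfold stockout_by_period_alt
    simp only [hcounts, PySem.Dict.keys_counter, hsorted]
    rw [PySem.Dict.items_foldl_insert_fresh R (fun p => p)
      (fun p => PySem.Dict.getD (PySem.Dict.counter F) p 0) PySem.Dict.empty
      (fun a _ => PySem.Dict.contains_empty a) (by simpa using hRnd)]
    simp only [PySem.Dict.getD_counter]
    have hemp : (PySem.Dict.empty : PySem.Dict Int Int).items = [] := rfl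
    rw [hemp, List.nil_append]
    refine List.map_congr_left ?_
    intro a ha
    have h0 : (0 : Int) ≤ a := ((hmemR a).mp ha).2
    rw [hF, List.count_filter (by simpa using h0)]
  rw [hA, hB]


-- ===== VERDICT (by name: the statement is the Claim_ definition above) =====
theorem stockout_by_period_spec : Claim_equal_stockout_by_period := by
  intro E _ hpre
  unfold Spec_stockout_by_period
  exact stockout_main E hpre

@[simp] theorem stockout_by_period_raises : Claim_raises_stockout_by_period := by
  unfold Claim_raises_stockout_by_period
  exact ⟨by intro E _ h; simp [Raises_stockout_by_period] at h; simp [Pre_stockout_by_period, h], by decide⟩
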